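-- pv_equiv track=rewrite | github.com/Osmar-Junior-slz/doutorado-gpp | dockingpp/dockingpp/pipeline/run.py | _allocate_split_budget
-- ===== SOURCE A (Python) =====
-- def _allocate_split_budget(total_generations: int, total_pop_size: int, n_pockets: int) -> list[tuple[int, int]]:
--     if n_pockets <= 0:
--         return []
--     total_eval = max(1, int(total_generations) * int(total_pop_size))
--     base = total_eval // n_pockets
--     rem = total_eval % n_pockets
--     budgets: list[tuple[int, int]] = []
--     for idx in range(n_pockets):
--         eval_budget = base + (1 if idx < rem else 0)
--         pop_size = max(1, min(int(total_pop_size), int(eval_budget)))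
--         generations = max(1, int(eval_budget) // pop_size)
--         budgets.append((generations, pop_size))
--     return budgets
-- ===== SOURCE B (Python) =====
-- def _allocate_split_budget(total_generations: int, total_pop_size: int, n_pockets: int) -> list[tuple[int, int]]:
--     if n_pockets <= 0:
--         return []
--     budgets: list[tuple[int, int]] = []
--     remaining = max(1, int(total_generations) * int(total_pop_size))
--     k = n_pockets
--     while k > 0:
--         eval_budget = -((-remaining) // k)  # ceiling of the fair share of what is left
--         pop_size = max(1, min(int(total_pop_size), eval_budget))
--         budgets.append((max(1, eval_budget // pop_size), pop_size))
--         remaining -= eval_budget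
--         k -= 1
--     return budgets
-- ===== Notes on version B (the rewrite author's own statement) =====
-- stated objective: alternative
-- what changed: Instead of precomputing base = total//n and rem = total%n and branching on index < rem, B allocates greedily by recursion: each pocket takes the ceiling of the fair share of the remaining budget, which is subtracted before recursing on the rest; correctness follows because repeated ceiling division of b*k+r yields b+1 exactly r times then b.
import Mathlib
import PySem

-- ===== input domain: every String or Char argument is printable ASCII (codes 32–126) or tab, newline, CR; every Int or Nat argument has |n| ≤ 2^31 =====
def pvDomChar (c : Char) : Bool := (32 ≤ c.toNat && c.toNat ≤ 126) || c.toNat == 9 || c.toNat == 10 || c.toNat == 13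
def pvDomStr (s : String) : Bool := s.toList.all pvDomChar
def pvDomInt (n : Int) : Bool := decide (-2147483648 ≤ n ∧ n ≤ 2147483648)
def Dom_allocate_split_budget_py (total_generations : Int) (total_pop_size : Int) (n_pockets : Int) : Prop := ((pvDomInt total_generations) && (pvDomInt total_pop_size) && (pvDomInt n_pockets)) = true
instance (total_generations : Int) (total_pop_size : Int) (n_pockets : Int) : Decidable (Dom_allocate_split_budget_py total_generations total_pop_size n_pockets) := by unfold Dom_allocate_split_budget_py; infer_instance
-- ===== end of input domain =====

-- B replaces A's precomputed base/remainder split by a greedy recursion: each pocket takes the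
-- ceiling of the fair share of the REMAINING budget, which is then subtracted (alternative algorithm, same cost).

-- ===== PORT A =====
def allocate_split_budget_py (total_generations : Int) (total_pop_size : Int) (n_pockets : Int) : List (Int × Int) :=
  if n_pockets ≤ 0 then []
  else
    let total_eval := max 1 (total_generations * total_pop_size)
    let base := PySem.Int.floordiv total_eval n_pockets
    let rem := PySem.Int.mod total_eval n_pockets
    (PySem.List.pyRange 0 n_pockets 1).foldl
      (fun budgets idx =>
        let eval_budget := base + (if idx < rem then 1 else 0)
        let pop_size := max 1 (min total_pop_size eval_budget)
        let generations := max 1 (PySem.Int.floordiv eval_budget pop_size)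
        budgets ++ [(generations, pop_size)]) []

-- ===== PORT B =====
-- Python B loops on the integer counter k, decremented from the positive
-- n_pockets down to 0, appending one tuple per step; the loop is transcribed as structural recursion on that counter as a Nat, over the same (remaining, k) state.
def allocate_split_budget_py_go (total_pop_size : Int) (remaining : Int) (k : Nat) : List (Int × Int) :=
  match k with
  | 0 => []
  | k + 1 =>
    let eval_budget := -(PySem.Int.floordiv (-remaining) ((k : Int) + 1))  -- ceiling of the fair share of what is left
    let pop_size := max 1 (min total_pop_size eval_budget)
    let generations := max 1 (PySem.Int.floordiv eval_budget pop_size)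
    [(generations, pop_size)] ++ allocate_split_budget_py_go total_pop_size (remaining - eval_budget) k

def allocate_split_budget_py_alt (total_generations : Int) (total_pop_size : Int) (n_pockets : Int) : List (Int × Int) :=
  if n_pockets ≤ 0 then []
  else allocate_split_budget_py_go total_pop_size (max 1 (total_generations * total_pop_size)) n_pockets.toNat

-- ===== PRECONDITION & SPEC =====
def Spec_allocate_split_budget_py (total_generations : Int) (total_pop_size : Int) (n_pockets : Int) (out : List (Int × Int)) : Prop := out = allocate_split_budget_py_alt total_generations total_pop_size n_pockets
instance (total_generations : Int) (total_pop_size : Int) (n_pockets : Int) (out : List (Int × Int)) : Decidable (Spec_allocate_split_budget_py total_generations total_pop_size n_pockets out) := by unfold Spec_allocate_split_budget_py; infer_instance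

-- ===== CLAIM =====
def Claim_equal_allocate_split_budget_py : Prop := ∀ (total_generations : Int) (total_pop_size : Int) (n_pockets : Int), Dom_allocate_split_budget_py total_generations total_pop_size n_pockets → Spec_allocate_split_budget_py total_generations total_pop_size n_pockets (allocate_split_budget_py total_generations total_pop_size n_pockets)

-- ===== LEMMAS AND PROOFS =====

-- the per-pocket tuple as a function of its evaluation budget
def pvEntry (tps e : Int) : Int × Int :=
  (max 1 (PySem.Int.floordiv e (max 1 (min tps e))), max 1 (min tps e))

theorem foldl_append_singleton {α β : Type} (f : α → β) (l : List α) (init : List β) :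
    l.foldl (fun acc x => acc ++ [f x]) init = init ++ l.map f := by
  induction l generalizing init with
  | nil => simp
  | cons x xs ih => simp [List.foldl, ih]

-- the greedy recursion realizes the base/base+1 split: on input b*k + r (0 ≤ r ≤ k),
-- pocket i gets budget b+1 if i < r and b otherwise
theorem go_eq_map (tps : Int) : ∀ (k : Nat) (b r : Int), 0 ≤ r → r ≤ (k : Int) →
    allocate_split_budget_py_go tps (b * k + r) k
      = (List.range k).map (fun i : Nat => pvEntry tps (b + if (i : Int) < r then 1 else 0)) := by
  intro k
  induction k with
  | zero =>
    intro b r h0 h1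
    simp [allocate_split_budget_py_go]
  | succ k ih =>
    intro b r h0 h1
    set c : Int := if 0 < r then 1 else 0 with hc
    have hc0 : c = 0 ∨ c = 1 := by by_cases h : 0 < r <;> simp [hc, h]
    have hcr : (c = 1 → 0 < r) ∧ (c = 0 → r = 0) := by
      constructor <;> (intro h; by_cases hr : 0 < r <;> simp [hc, hr] at h ⊢ <;> omega)
    have h1' : r ≤ (k : Int) + 1 := by push_cast at h1; linarith
    have heval : -(PySem.Int.floordiv (-(b * ((k : Int) + 1) + r)) ((k : Int) + 1)) = b + c := by
      rw [PySem.Int.neg_floordiv_neg_eq_iff_of_pos (by positivity)]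
      rcases hc0 with h | h <;> rcases hcr with ⟨hc1, hczero⟩ <;> rw [h]
      · have hr0 := hczero h; constructor <;> nlinarith
      · have hr1 := hc1 h; constructor <;> nlinarith
    have hrec : b * ((k : Nat) + 1 : Int) + r - (b + c) = b * (k : Int) + (r - c) := by ring
    have htail := ih b (r - c) (by rcases hc0 with h | h <;> rcases hcr with ⟨h1', h2'⟩ <;> omega)
      (by rcases hc0 with h | h <;> omega)
    simp only [allocate_split_budget_py_go]
    have hcast : ((k + 1 : Nat) : Int) = (k : Int) + 1 := by push_cast; ring
    rw [show (b * ((k + 1 : Nat) : Int) + r) = (b * ((k : Int) + 1) + r) by rw [hcast]]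
    rw [heval]
    rw [show b * ((k : Int) + 1) + r - (b + c) = b * (k : Int) + (r - c) by ring]
    rw [htail]
    rw [List.range_succ_eq_map, List.map_cons, List.map_map]
    have hhead : pvEntry tps (b + if ((0 : Nat) : Int) < r then 1 else 0) = pvEntry tps (b + c) := by
      simp [hc]
    have hmaps : (List.range k).map ((fun i : Nat => pvEntry tps (b + if (i : Int) < r then 1 else 0)) ∘ Nat.succ)
        = (List.range k).map (fun i : Nat => pvEntry tps (b + if (i : Int) < r - c then 1 else 0)) := by
      apply List.map_congr_left
      intro i _
      simp only [Function.comp]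
      congr 2
      rcases hc0 with h | h <;> rcases hcr with ⟨h1', h2'⟩
      · have := h2' h
        simp [this, h]
        omega
      · have := h1' h
        rw [h]
        by_cases hi : (i : Int) < r - 1
        · rw [if_pos hi, if_pos (by push_cast; omega)]
        · rw [if_neg hi, if_neg (by push_cast; omega)]
    rw [hmaps, hhead]
    simp [pvEntry]

theorem allocate_eq (total_generations total_pop_size n_pockets : Int) :
    allocate_split_budget_py total_generations total_pop_size n_pockets
      = allocate_split_budget_py_alt total_generations total_pop_size n_pockets := by
  unfold allocate_split_budget_py allocate_split_budget_py_alt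
  by_cases h : n_pockets ≤ 0
  · simp [h]
  · simp only [h, if_false]
    have hpos : 0 < n_pockets := lt_of_not_ge h
    set T := max 1 (total_generations * total_pop_size) with hT
    set base := PySem.Int.floordiv T n_pockets with hb
    set rem := PySem.Int.mod T n_pockets with hr
    have hrem0 : 0 ≤ rem := by rw [hr]; exact PySem.Int.mod_nonneg T hpos
    have hremlt : rem < n_pockets := by rw [hr]; exact PySem.Int.mod_lt T hpos
    have hid : base * n_pockets + rem = T := by
      rw [hb, hr]; exact PySem.Int.floordiv_mul_add_mod T n_pockets
    have hcast : ((n_pockets.toNat : Nat) : Int) = n_pockets := by omega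
    have hBeq : allocate_split_budget_py_go total_pop_size T n_pockets.toNat
        = (List.range n_pockets.toNat).map (fun i : Nat => pvEntry total_pop_size (base + if (i : Int) < rem then 1 else 0)) := by
      rw [show T = base * ((n_pockets.toNat : Nat) : Int) + rem by rw [hcast]; omega]
      exact go_eq_map total_pop_size n_pockets.toNat base rem hrem0 (by omega)
    rw [hBeq, PySem.List.pyRange_one, foldl_append_singleton]
    have h0 : n_pockets - 0 = n_pockets := by ring
    rw [h0]
    simp only [List.nil_append, List.map_map]
    apply List.map_congr_left
    intro k _
    simp only [Function.comp, zero_add]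
    simp [pvEntry]

-- ===== VERDICT =====
theorem allocate_split_budget_py_spec : Claim_equal_allocate_split_budget_py := by
  intro g p n _
  unfold Spec_allocate_split_budget_py
  exact allocate_eq g p n
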